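-- pv_equiv track=rewrite | github.com/aasmirn/prgrm | bonus/bonus3.py | check
-- ===== SOURCE A (Python) =====
-- def check(phrase):
--     latin = "abcdefghijklmnopqrstuvwxyz' "
--     check = ''
--     for sym in phrase:
--         if sym not in latin:
--             check += 'not good'
--             break
--     return check
-- ===== SOURCE B (Python) =====
-- def check(phrase):
--     latin = "abcdefghijklmnopqrstuvwxyz' "
--     chars = list(phrase)
--     return '' if sum(chars.count(c) for c in latin) == len(chars) else 'not good'
-- ===== Notes on version B (the rewrite author's own statement) =====
-- stated objective: alternative
-- what changed: Replaced the per-symbol membership loop with early break by an arithmetic criterion: sum the occurrence counts of each distinct allowed character and compare the total with the phrase length (equal iff all characters are allowed).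
import Mathlib
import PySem

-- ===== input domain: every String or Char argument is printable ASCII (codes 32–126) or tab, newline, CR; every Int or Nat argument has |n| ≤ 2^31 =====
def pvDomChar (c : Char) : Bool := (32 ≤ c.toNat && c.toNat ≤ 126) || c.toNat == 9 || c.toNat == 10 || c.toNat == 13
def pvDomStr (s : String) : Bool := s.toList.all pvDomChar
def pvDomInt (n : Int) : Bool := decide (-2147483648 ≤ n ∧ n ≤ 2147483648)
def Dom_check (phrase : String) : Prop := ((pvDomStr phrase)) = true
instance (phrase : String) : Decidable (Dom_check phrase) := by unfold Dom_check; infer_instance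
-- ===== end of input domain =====

-- B replaces A's per-symbol membership loop with early break by an arithmetic check: the
-- occurrence counts of the (distinct) allowed characters sum to the phrase length iff every
-- character is allowed (alternative decomposition; no membership test, no early exit).

-- ===== PORT A =====
def checkLatin : List Char := "abcdefghijklmnopqrstuvwxyz' ".toList

-- the for-loop with `break`: stop and append 'not good' at the first disallowed symbol
def checkGo (acc : String) : List Char → String
  | [] => acc
  | sym :: rest => if sym ∈ checkLatin then checkGo acc rest else acc ++ "not good"

def check (phrase : String) : String := checkGo "" phrase.toList

-- ===== PORT B =====
def check_alt (phrase : String) : String :=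
  if (checkLatin.map (fun c => phrase.toList.count c)).sum == phrase.toList.length
  then "" else "not good"

-- ===== PRECONDITION & SPEC =====
def Spec_check (phrase : String) (out : String) : Prop := out = check_alt phrase
instance (phrase : String) (out : String) : Decidable (Spec_check phrase out) := by unfold Spec_check; infer_instance

-- ===== CLAIM (what is proved, stated in full; the proofs are below) =====
def Claim_equal_check : Prop := ∀ (phrase : String), Dom_check phrase → Spec_check phrase (check phrase)

-- ===== LEMMAS AND PROOFS =====
theorem checkGo_eq (l : List Char) :
    checkGo "" l = if ∀ x ∈ l, x ∈ checkLatin then "" else "not good" := by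
  induction l with
  | nil => simp [checkGo]
  | cons c rest ih =>
    by_cases hc : c ∈ checkLatin
    · simp [checkGo, hc, ih]
    · simp [checkGo, hc]

theorem countP_cons_mem (c : Char) (rest : List Char) (hc : c ∉ rest) (xs : List Char) :
    xs.countP (fun x => decide (x = c) || decide (x ∈ rest)) =
      xs.count c + xs.countP (fun x => decide (x ∈ rest)) := by
  induction xs with
  | nil => simp
  | cons x xs ih =>
    rw [List.countP_cons, List.countP_cons, List.count_cons, ih]
    by_cases hx : x = c
    · subst hx
      have hxr : x ∉ rest := hc
      simp [hxr]; omega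
    · by_cases hr : x ∈ rest
      · simp [hx, hr]; omega
      · simp [hx, hr]

theorem sum_counts_eq_countP (xs : List Char) (l : List Char) (h : l.Nodup) :
    (l.map (fun c => xs.count c)).sum = xs.countP (fun x => decide (x ∈ l)) := by
  induction l with
  | nil => simp
  | cons c rest ih =>
    have hc : c ∉ rest := (List.nodup_cons.mp h).1
    have hcong : xs.countP (fun x => decide (x ∈ c :: rest)) =
        xs.countP (fun x => decide (x = c) || decide (x ∈ rest)) := by
      apply List.countP_congr; intro x _; simp [List.mem_cons]
    rw [List.map_cons, List.sum_cons, ih (List.nodup_cons.mp h).2, hcong,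
      countP_cons_mem c rest hc xs]

theorem sum_counts_eq_length_iff (xs : List Char) :
    ((checkLatin.map (fun c => xs.count c)).sum = xs.length) ↔ (∀ x ∈ xs, x ∈ checkLatin) := by
  have hnd : checkLatin.Nodup := by decide
  rw [sum_counts_eq_countP xs checkLatin hnd]
  constructor
  · intro h x hx
    simpa using List.countP_eq_length.mp h x hx
  · intro h
    exact List.countP_eq_length.mpr (fun x hx => by simpa using h x hx)

-- ===== VERDICT (by name: the statement is the Claim_ definition above) =====
theorem check_spec : Claim_equal_check := by
  intro phrase _
  unfold Spec_check check check_alt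
  rw [checkGo_eq]
  by_cases h : ∀ x ∈ phrase.toList, x ∈ checkLatin
  · rw [if_pos h, if_pos (by simpa using (sum_counts_eq_length_iff phrase.toList).mpr h)]
  · rw [if_neg h, if_neg (by simpa using fun hc => h ((sum_counts_eq_length_iff phrase.toList).mp hc))]
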